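-- pv_equiv track=rewrite | github.com/thiagodsd/from-deep-learning-master-to-two-pointer-disaster | hackerrank/hackerrank-count-triplets.py | triplets
-- ===== SOURCE A (Python) =====
-- def triplets(a:list, b:list, c:list) -> int:
--     """
--     psychological support
--         p \in a
--         q \in b
--         r \in c
--             p <= q
--             r <= q
--         ---
--         a = [1, 3, 5]
--         b = [2, 3]
--         c = [1, 2, 3]
--     """
--     a = sorted(set(a))
--     b = sorted(set(b))
--     c = sorted(set(c))
--     result = int()
--
--     def binary_search(arr:list, target:int) -> int:
--         left = 0
--         right = len(arr)
--         while left < right: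
--             mid = (left + right) // 2
--             if arr[mid] <= target:
--                 left = mid + 1
--             else:
--                 right = mid
--         return left
--
--     for q in b:
--         count_a = binary_search(a, q)
--         count_c = binary_search(c, q)
--         result += count_a * count_c
--     return result
-- ===== SOURCE B (Python) =====
-- def triplets(a: list, b: list, c: list) -> int:
--     sa = sorted(set(a))
--     sb = sorted(set(b))
--     sc = sorted(set(c))
--     i = j = 0
--     result = 0
--     for q in sb:
--         while i < len(sa) and sa[i] <= q:
--             i += 1
--         while j < len(sc) and sc[j] <= q:
--             j += 1
--         result += i * j
--     return result
-- ===== Notes on version B (the rewrite author's own statement) =====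
-- stated objective: faster
-- what changed: Replaces the per-q binary searches with a single merge-style sweep: two monotone forward pointers into sorted(set(a)) and sorted(set(c)) advance once across the whole run, so the counts come from a linear pass instead of repeated O(log n) searches.
import Mathlib
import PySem

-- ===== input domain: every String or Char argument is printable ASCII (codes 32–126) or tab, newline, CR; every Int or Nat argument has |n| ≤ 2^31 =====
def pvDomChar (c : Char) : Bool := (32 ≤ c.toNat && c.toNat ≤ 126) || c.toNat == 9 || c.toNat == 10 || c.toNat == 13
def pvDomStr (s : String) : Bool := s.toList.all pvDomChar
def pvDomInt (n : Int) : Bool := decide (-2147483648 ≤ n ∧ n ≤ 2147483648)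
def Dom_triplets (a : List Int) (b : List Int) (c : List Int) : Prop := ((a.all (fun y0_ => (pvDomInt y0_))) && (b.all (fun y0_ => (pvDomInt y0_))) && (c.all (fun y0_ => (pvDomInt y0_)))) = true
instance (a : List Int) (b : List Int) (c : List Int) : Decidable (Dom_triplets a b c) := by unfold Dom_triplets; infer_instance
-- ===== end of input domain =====

-- B replaces A's per-q binary searches by one linear two-pointer sweep over the sorted lists (objective: faster).

-- ===== PORT A =====
-- the inner while-loop of A's binary_search
def bsLoop (arr : List Int) (t : Int) (left right : Nat) : Nat :=
  if left < right then
    let mid := (left + right) / 2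
    if (PySem.List.pyGet? arr (mid : Int)).getD 0 ≤ t then bsLoop arr t (mid + 1) right
    else bsLoop arr t left mid
  else left
termination_by right - left
decreasing_by all_goals omega

def triplets (a : List Int) (b : List Int) (c : List Int) : Int :=
  let sa := PySem.List.sorted (PySem.Set.ofList a) (fun x => x) false
  let sb := PySem.List.sorted (PySem.Set.ofList b) (fun x => x) false
  let sc := PySem.List.sorted (PySem.Set.ofList c) (fun x => x) false
  sb.foldl (fun result q =>
    let count_a := bsLoop sa q 0 sa.length
    let count_c := bsLoop sc q 0 sc.length
    result + (count_a : Int) * (count_c : Int)) 0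

-- ===== PORT B =====
-- the 'while i < len(arr) and arr[i] <= q: i += 1' loop of B
def advanceP (arr : List Int) (q : Int) (i : Nat) : Nat :=
  if h : i < arr.length then
    if arr[i] ≤ q then advanceP arr q (i + 1) else i
  else i
termination_by arr.length - i
decreasing_by omega

def triplets_alt (a : List Int) (b : List Int) (c : List Int) : Int :=
  let sa := PySem.List.sorted (PySem.Set.ofList a) (fun x => x) false
  let sb := PySem.List.sorted (PySem.Set.ofList b) (fun x => x) false
  let sc := PySem.List.sorted (PySem.Set.ofList c) (fun x => x) false
  (sb.foldl (fun st q =>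
      let i := advanceP sa q st.1
      let j := advanceP sc q st.2.1
      (i, j, st.2.2 + (i : Int) * (j : Int))) ((0 : Nat), (0 : Nat), (0 : Int))).2.2

-- ===== PRECONDITION & SPEC =====
def Spec_triplets (a : List Int) (b : List Int) (c : List Int) (out : Int) : Prop := out = triplets_alt a b c
instance (a : List Int) (b : List Int) (c : List Int) (out : Int) : Decidable (Spec_triplets a b c out) := by unfold Spec_triplets; infer_instance

-- ===== CLAIM (what is proved, stated in full; the proofs are below) =====
def Claim_equal_triplets : Prop := ∀ (a : List Int) (b : List Int) (c : List Int), Dom_triplets a b c → Spec_triplets a b c (triplets a b c)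

-- ===== LEMMAS AND PROOFS =====

-- 'L is the cut point of arr at t': indices below L hold values ≤ t, indices from L on hold values > t
def Cut (arr : List Int) (t : Int) (L : Nat) : Prop :=
  L ≤ arr.length ∧ ∀ k (h : k < arr.length), (arr[k] ≤ t ↔ k < L)

theorem cut_eq_countP (arr : List Int) (t : Int) (L : Nat) (h : Cut arr t L) :
    L = arr.countP (fun x => decide (x ≤ t)) := by
  obtain ⟨hL, hcut⟩ := h
  have hsplit : arr = arr.take L ++ arr.drop L := (List.take_append_drop L arr).symm
  have h1 : (arr.take L).countP (fun x => decide (x ≤ t)) = (arr.take L).length := by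
    rw [List.countP_eq_length]
    intro x hx
    obtain ⟨k, hk', hx'⟩ := List.mem_iff_getElem.mp hx
    have hk2 : k < arr.length := by simp at hk'; omega
    have hkL : k < L := by simp at hk'; omega
    have hg : (arr.take L)[k] = arr[k] := List.getElem_take
    simp only [decide_eq_true_eq]
    rw [← hx', hg]
    exact (hcut k hk2).mpr hkL
  have h2 : (arr.drop L).countP (fun x => decide (x ≤ t)) = 0 := by
    rw [List.countP_eq_zero]
    intro x hx
    obtain ⟨k, hk', hx'⟩ := List.mem_iff_getElem.mp hx
    have hk2 : L + k < arr.length := by simp at hk'; omega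
    have hg : (arr.drop L)[k] = arr[L + k] := List.getElem_drop
    simp only [decide_eq_true_eq]
    rw [← hx', hg]
    intro hle
    have := (hcut (L + k) hk2).mp hle
    omega
  calc L = (arr.take L).length := by simp [Nat.min_eq_left hL]
    _ = (arr.take L).countP (fun x => decide (x ≤ t)) := h1.symm
    _ = (arr.take L).countP (fun x => decide (x ≤ t)) + (arr.drop L).countP (fun x => decide (x ≤ t)) := by omega
    _ = arr.countP (fun x => decide (x ≤ t)) := by rw [← List.countP_append, ← hsplit]

theorem bsLoop_cut (arr : List Int) (hs : arr.Pairwise (· ≤ ·)) (t : Int) :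
    ∀ n left right, right - left ≤ n → left ≤ right → right ≤ arr.length →
    (∀ k (h : k < arr.length), k < left → arr[k] ≤ t) →
    (∀ k (h : k < arr.length), right ≤ k → ¬ arr[k] ≤ t) →
    Cut arr t (bsLoop arr t left right) := by
  intro n
  induction n with
  | zero =>
    intro l r hn hlr hr hbelow habove
    have hlr' : l = r := by omega
    rw [bsLoop]
    simp only [show ¬ l < r by omega, if_false]
    exact ⟨by omega, fun k h => ⟨fun hle => by by_contra hk; exact habove k h (by omega) hle,
      fun hk => hbelow k h hk⟩⟩
  | succ n ih =>
    intro l r hn hlr hr hbelow habove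
    by_cases hc : l < r
    · rw [bsLoop]
      simp only [hc, if_true]
      have hmid : (l + r) / 2 < arr.length := by omega
      have hget : (PySem.List.pyGet? arr (((l + r) / 2 : Nat) : Int)).getD 0 = arr[(l + r) / 2] := by
        rw [PySem.List.pyGet?_natCast, List.getElem?_eq_getElem hmid]; rfl
      rw [hget]
      have hmono := List.pairwise_iff_getElem.mp hs
      by_cases hv : arr[(l + r) / 2] ≤ t
      · simp only [hv, if_true]
        refine ih ((l + r) / 2 + 1) r (by omega) (by omega) hr ?_ habove
        intro k h hk
        by_cases hkl : k < (l + r) / 2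
        · exact le_trans (hmono k ((l + r) / 2) h hmid hkl) hv
        · have : k = (l + r) / 2 := by omega
          subst this; exact hv
      · simp only [hv, if_false]
        refine ih l ((l + r) / 2) (by omega) (by omega) (by omega) hbelow ?_
        intro k h hk
        by_cases hkm : (l + r) / 2 < k
        · intro hle; exact hv (le_trans (hmono ((l + r) / 2) k hmid h hkm) hle)
        · have : k = (l + r) / 2 := by omega
          subst this; exact hv
    · rw [bsLoop]
      simp only [hc, if_false]
      have hlr' : l = r := by omega
      exact ⟨by omega, fun k h => ⟨fun hle => by by_contra hk; exact habove k h (by omega) hle,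
        fun hk => hbelow k h hk⟩⟩

theorem advanceP_cut (arr : List Int) (hs : arr.Pairwise (· ≤ ·)) (q : Int) :
    ∀ n i, arr.length - i ≤ n → i ≤ arr.length →
    (∀ k (h : k < arr.length), k < i → arr[k] ≤ q) →
    Cut arr q (advanceP arr q i) := by
  intro n
  induction n with
  | zero =>
    intro i hn hi hbelow
    have : i = arr.length := by omega
    rw [advanceP]
    simp only [show ¬ i < arr.length by omega, dif_neg, not_false_iff]
    exact ⟨hi, fun k h => ⟨fun _ => by omega, fun hk => hbelow k h hk⟩⟩
  | succ n ih =>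
    intro i hn hi hbelow
    have hmono := List.pairwise_iff_getElem.mp hs
    rw [advanceP]
    by_cases h : i < arr.length
    · simp only [h, dif_pos]
      by_cases hv : arr[i] ≤ q
      · simp only [hv, if_true]
        refine ih (i + 1) (by omega) (by omega) ?_
        intro k hk hki
        by_cases hkl : k < i
        · exact hbelow k hk hkl
        · have : k = i := by omega
          subst this; exact hv
      · simp only [hv, if_false]
        refine ⟨by omega, fun k hk => ⟨fun hle => ?_, fun hki => hbelow k hk hki⟩⟩
        by_contra hki
        have hik : i ≤ k := by omega
        by_cases hik' : i < k
        · exact hv (le_trans (hmono i k h hk hik') hle)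
        · have : k = i := by omega
          subst this; exact hv hle
    · simp only [h, dif_neg, not_false_iff]
      exact ⟨hi, fun k hk => ⟨fun _ => by omega, fun hki => hbelow k hk hki⟩⟩

-- the common mathematical value of both counting procedures
def cntLE (arr : List Int) (t : Int) : Nat := arr.countP (fun x => decide (x ≤ t))

theorem bsLoop_eq_cnt (arr : List Int) (hs : arr.Pairwise (· ≤ ·)) (t : Int) :
    bsLoop arr t 0 arr.length = cntLE arr t :=
  cut_eq_countP arr t _ (bsLoop_cut arr hs t arr.length 0 arr.length (by omega) (by omega)
    le_rfl (by omega) (by omega))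

theorem advanceP_eq_cnt (arr : List Int) (hs : arr.Pairwise (· ≤ ·)) (q : Int) (i : Nat)
    (hi : i ≤ arr.length) (hbelow : ∀ k (h : k < arr.length), k < i → arr[k] ≤ q) :
    advanceP arr q i = cntLE arr q :=
  cut_eq_countP arr q _ (advanceP_cut arr hs q arr.length i (by omega) hi hbelow)

theorem cnt_le_length (arr : List Int) (t : Int) : cntLE arr t ≤ arr.length :=
  List.countP_le_length

theorem cnt_below (arr : List Int) (hs : arr.Pairwise (· ≤ ·)) (t t' : Int) (htt : t ≤ t') :
    ∀ k (h : k < arr.length), k < cntLE arr t → arr[k] ≤ t' := by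
  intro k h hk
  have hcut := advanceP_cut arr hs t arr.length 0 (by omega) (by omega) (by omega)
  have heq := advanceP_eq_cnt arr hs t 0 (by omega) (by omega)
  rw [heq] at hcut
  exact le_trans ((hcut.2 k h).mpr hk) htt

-- the main fold invariant: B's sweep fold computes A's per-element-count fold
theorem fold_sweep (sa sc : List Int) (ha : sa.Pairwise (· ≤ ·)) (hc : sc.Pairwise (· ≤ ·)) :
    ∀ (sb : List Int), sb.Pairwise (· ≤ ·) →
    ∀ (i j : Nat) (res : Int),
    i ≤ sa.length → j ≤ sc.length →
    (∀ q ∈ sb, ∀ k (h : k < sa.length), k < i → sa[k] ≤ q) →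
    (∀ q ∈ sb, ∀ k (h : k < sc.length), k < j → sc[k] ≤ q) →
    (sb.foldl (fun st q =>
      let i := advanceP sa q st.1
      let j := advanceP sc q st.2.1
      (i, j, st.2.2 + (i : Int) * (j : Int))) (i, j, res)).2.2 =
    sb.foldl (fun result q => result + (cntLE sa q : Int) * (cntLE sc q : Int)) res := by
  intro sb
  induction sb with
  | nil => intro _ i j res _ _ _ _; rfl
  | cons q tl ih =>
    intro hsb i j res hi hj hia hjc
    simp only [List.foldl_cons]
    have hq : q ∈ q :: tl := List.mem_cons_self
    have hiq := advanceP_eq_cnt sa ha q i hi (hia q hq)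
    have hjq := advanceP_eq_cnt sc hc q j hj (hjc q hq)
    have hqtl : ∀ q' ∈ tl, q ≤ q' := fun q' hq' => (List.pairwise_cons.mp hsb).1 q' hq'
    simp only [hiq, hjq]
    exact ih (List.pairwise_cons.mp hsb).2 _ _ _ (cnt_le_length sa q) (cnt_le_length sc q)
      (fun q' hq' k h hk => cnt_below sa ha q q' (hqtl q' hq') k h hk)
      (fun q' hq' k h hk => cnt_below sc hc q q' (hqtl q' hq') k h hk)

theorem pairwise_le_sorted_set (xs : List Int) :
    (PySem.List.sorted (PySem.Set.ofList xs) (fun x => x) false).Pairwise (· ≤ ·) :=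
  (PySem.List.sorted_ofList_pairwise_lt (xs := xs)).imp (fun h => le_of_lt h)

-- ===== VERDICT (by name: the statement is the Claim_ definition above) =====
theorem triplets_spec : Claim_equal_triplets := by
  intro a b c _
  have ha := pairwise_le_sorted_set a
  have hb := pairwise_le_sorted_set b
  have hc := pairwise_le_sorted_set c
  unfold Spec_triplets
  show triplets a b c = triplets_alt a b c
  simp only [triplets, triplets_alt]
  rw [fold_sweep _ _ ha hc _ hb 0 0 0 (by omega) (by omega) (by omega) (by omega)]
  refine PySem.List.foldl_congr_mem _ _ _ _ ?_
  intro acc q _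
  simp only [bsLoop_eq_cnt _ ha q, bsLoop_eq_cnt _ hc q]
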